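-- pv_equiv track=rewrite | github.com/husam-deriv/agent-engine | backend-legacy/project_analyzer.py | _should_downgrade_architecture
-- ===== SOURCE A (Python) =====
-- from typing import Dict, List, Any, Optional
--
-- def _should_downgrade_architecture(result: Dict[str, Any], question_answers: List[Dict[str, str]]) -> bool:
--     """Check if the architecture should be downgraded based on answers."""
--     if result.get("architecture_type") == "single_agent":
--         return False  # Already the simplest architecture
--
--     # Check if answers explicitly deny needing complex architecture
--     integration_denial = False
--     data_denial = False
--     simple_need = False
--
--     for qa in question_answers:
--         answer_lower = qa["answer"].lower()
--         question_lower = qa["question"].lower()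
--
--         # Check for explicit denial of integration needs
--         if "integration" in question_lower or "existing systems" in question_lower:
--             integration_denial = ("no" in answer_lower or "not" in answer_lower or "won't" in answer_lower or
--                                  "doesn't" in answer_lower or "does not" in answer_lower)
--
--         # Check for denial of data collection/analysis needs
--         if "data" in question_lower or "deliverables" in question_lower or "outcome" in question_lower:
--             data_denial = ("no data" in answer_lower or "without data" in answer_lower or
--                           "purely conversation" in answer_lower or "just conversation" in answer_lower or
--                           "only conversation" in answer_lower)
--
--         # Check for simple needs
--         if "expect" in question_lower or "deliverable" in question_lower or "outcome" in question_lower: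
--             simple_need = ("simple" in answer_lower or "basic" in answer_lower or "just" in answer_lower or
--                           "only" in answer_lower or "merely" in answer_lower)
--
--     # Downgrade if there are explicit denials contradicting a complex architecture
--     return (integration_denial and data_denial) or (simple_need and (integration_denial or data_denial))
-- ===== SOURCE B (Python) =====
-- def _should_downgrade_architecture(result, question_answers):
--     """Check if the architecture should be downgraded based on answers."""
--     if result.get("architecture_type") == "single_agent":
--         return False  # Already the simplest architecture
--
--     def _last_answer(question_keys):
--         # last-match-wins: scan backwards, first matching question wins
--         for qa in reversed(question_answers):
--             if any(k in qa["question"].lower() for k in question_keys):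
--                 return qa["answer"].lower()
--         return None
--
--     def _flag(question_keys, answer_keys):
--         ans = _last_answer(question_keys)
--         return ans is not None and any(k in ans for k in answer_keys)
--
--     integration_denial = _flag(
--         ("integration", "existing systems"),
--         ("no", "not", "won't", "doesn't", "does not"))
--     data_denial = _flag(
--         ("data", "deliverables", "outcome"),
--         ("no data", "without data", "purely conversation",
--          "just conversation", "only conversation"))
--     simple_need = _flag(
--         ("expect", "deliverable", "outcome"),
--         ("simple", "basic", "just", "only", "merely"))
--
--     return (integration_denial and data_denial) or (simple_need and (integration_denial or data_denial))
-- ===== Notes on version B (the rewrite author's own statement) =====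
-- stated objective: alternative
-- what changed: Replaces A's single interleaved loop carrying three overwritten flags by three independent last-match-wins passes, each scanning the answers backwards and stopping at the first matching question.
import Mathlib
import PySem

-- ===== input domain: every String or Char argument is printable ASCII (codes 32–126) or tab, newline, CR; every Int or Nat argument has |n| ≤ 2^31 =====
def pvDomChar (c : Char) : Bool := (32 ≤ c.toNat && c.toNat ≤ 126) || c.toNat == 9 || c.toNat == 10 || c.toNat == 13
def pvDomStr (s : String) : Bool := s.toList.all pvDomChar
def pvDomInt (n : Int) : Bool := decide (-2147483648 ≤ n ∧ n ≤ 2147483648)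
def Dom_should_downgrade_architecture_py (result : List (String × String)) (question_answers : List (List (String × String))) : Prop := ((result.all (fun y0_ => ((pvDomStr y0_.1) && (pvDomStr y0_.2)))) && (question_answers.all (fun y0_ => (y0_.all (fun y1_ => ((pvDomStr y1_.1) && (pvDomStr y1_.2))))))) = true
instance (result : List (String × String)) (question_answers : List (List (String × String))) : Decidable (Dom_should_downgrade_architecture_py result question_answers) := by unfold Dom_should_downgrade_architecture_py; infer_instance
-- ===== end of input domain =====

-- B replaces A's single interleaved loop with three flags by three independent
-- last-match-wins passes (reversed scan, first hit); return values agree wherever A returns.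


-- ===== PORT A =====
-- qa["question"].lower() / qa["answer"].lower(); the `.getD ""` default is unreachable
-- under Pre_ (Python raises KeyError on a missing key, excluded by Pre_ below).
def pvQL (qa : List (String × String)) : String :=
  PySem.Str.lower (((PySem.Dict.mk qa).get? "question").getD "")
def pvAL (qa : List (String × String)) : String :=
  PySem.Str.lower (((PySem.Dict.mk qa).get? "answer").getD "")

def should_downgrade_architecture_py (result : List (String × String)) (question_answers : List (List (String × String))) : Bool :=
  if ((PySem.Dict.mk result).get? "architecture_type") = some "single_agent" then false
  else
    let st := question_answers.foldl (fun (st : Bool × Bool × Bool) qa =>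
      let ql := pvQL qa
      let al := pvAL qa
      let integration_denial :=
        if PySem.Str.isIn "integration" ql || PySem.Str.isIn "existing systems" ql then
          (PySem.Str.isIn "no" al || PySem.Str.isIn "not" al || PySem.Str.isIn "won't" al ||
           PySem.Str.isIn "doesn't" al || PySem.Str.isIn "does not" al)
        else st.1
      let data_denial :=
        if PySem.Str.isIn "data" ql || PySem.Str.isIn "deliverables" ql || PySem.Str.isIn "outcome" ql then
          (PySem.Str.isIn "no data" al || PySem.Str.isIn "without data" al ||
           PySem.Str.isIn "purely conversation" al || PySem.Str.isIn "just conversation" al ||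
           PySem.Str.isIn "only conversation" al)
        else st.2.1
      let simple_need :=
        if PySem.Str.isIn "expect" ql || PySem.Str.isIn "deliverable" ql || PySem.Str.isIn "outcome" ql then
          (PySem.Str.isIn "simple" al || PySem.Str.isIn "basic" al || PySem.Str.isIn "just" al ||
           PySem.Str.isIn "only" al || PySem.Str.isIn "merely" al)
        else st.2.2
      (integration_denial, data_denial, simple_need)) (false, false, false)
    (st.1 && st.2.1) || (st.2.2 && (st.1 || st.2.1))

-- ===== PORT B =====
-- _last_answer: scan reversed(question_answers), return the first matching qa's lowered answer
def pvLastAnswer (question_answers : List (List (String × String))) (qkeys : List String) : Option String :=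
  question_answers.reverse.findSome? (fun qa =>
    if qkeys.any (fun k => PySem.Str.isIn k (pvQL qa)) then some (pvAL qa) else none)

-- _flag: ans is not None and any(k in ans for k in answer_keys)
def pvFlag (question_answers : List (List (String × String))) (qkeys akeys : List String) : Bool :=
  match pvLastAnswer question_answers qkeys with
  | none => false
  | some a => akeys.any (fun k => PySem.Str.isIn k a)

def should_downgrade_architecture_py_alt (result : List (String × String)) (question_answers : List (List (String × String))) : Bool :=
  if ((PySem.Dict.mk result).get? "architecture_type") = some "single_agent" then false
  else
    let integration_denial := pvFlag question_answers
      ["integration", "existing systems"] ["no", "not", "won't", "doesn't", "does not"]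
    let data_denial := pvFlag question_answers
      ["data", "deliverables", "outcome"]
      ["no data", "without data", "purely conversation", "just conversation", "only conversation"]
    let simple_need := pvFlag question_answers
      ["expect", "deliverable", "outcome"] ["simple", "basic", "just", "only", "merely"]
    (integration_denial && data_denial) || (simple_need && (integration_denial || data_denial))

-- ===== PRECONDITION & SPEC =====
-- Pre_ excludes exactly the inputs on which A raises KeyError: a qa dict missing "question" or
-- "answer" when the loop is reached (the "single_agent" early return never touches the qa dicts).
def Pre_should_downgrade_architecture_py (result : List (String × String)) (question_answers : List (List (String × String))) : Prop :=
  ((PySem.Dict.mk result).get? "architecture_type") = some "single_agent" ∨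
    ∀ qa ∈ question_answers, ((PySem.Dict.mk qa).get? "question").isSome ∧ ((PySem.Dict.mk qa).get? "answer").isSome
instance (result : List (String × String)) (question_answers : List (List (String × String))) : Decidable (Pre_should_downgrade_architecture_py result question_answers) := by unfold Pre_should_downgrade_architecture_py; infer_instance

def pvWitness_should_downgrade_architecture_py : (List (String × String)) × (List (List (String × String))) :=
  ([("architecture_type", "multi_agent")],
   [[("question", "do you need integration?"), ("answer", "no")],
    [("question", "what outcome?"), ("answer", "just conversation")]])

def Spec_should_downgrade_architecture_py (result : List (String × String)) (question_answers : List (List (String × String))) (out : Bool) : Prop := out = should_downgrade_architecture_py_alt result question_answers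
instance (result : List (String × String)) (question_answers : List (List (String × String))) (out : Bool) : Decidable (Spec_should_downgrade_architecture_py result question_answers out) := by unfold Spec_should_downgrade_architecture_py; infer_instance

-- ===== CLAIM (what is proved, stated in full; the proofs are below) =====
def Claim_equal_should_downgrade_architecture_py : Prop := ∀ (result : List (String × String)) (question_answers : List (List (String × String))), Dom_should_downgrade_architecture_py result question_answers → Pre_should_downgrade_architecture_py result question_answers → Spec_should_downgrade_architecture_py result question_answers (should_downgrade_architecture_py result question_answers)

-- ===== LEMMAS AND PROOFS =====

def pvMatchD {α β : Type} (o : Option α) (f : α → β) (b : β) : β :=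
  match o with | some x => f x | none => b

-- an overwrite-fold returns the last match's value (or the start value)
theorem pv_foldl_overwrite {α : Type} (g h : α → Bool) (l : List α) (b : Bool) :
    l.foldl (fun acc x => if g x then h x else acc) b
      = pvMatchD (l.reverse.find? g) h b := by
  induction l generalizing b with
  | nil => simp [pvMatchD]
  | cons x xs ih =>
      simp only [List.foldl_cons, ih, List.reverse_cons, List.find?_append]
      cases hfx : xs.reverse.find? g with
      | some y => simp [pvMatchD]
      | none => by_cases hg : g x <;> simp [pvMatchD, hg, List.find?]

theorem pv_findSome?_if {α β : Type} (g : α → Bool) (f : α → β) (l : List α) :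
    l.findSome? (fun x => if g x then some (f x) else none) = (l.find? g).map f := by
  induction l with
  | nil => simp
  | cons x xs ih => by_cases hg : g x <;> simp [List.find?, hg, ih]

theorem pv_flag_eq (qas : List (List (String × String))) (g h : List (String × String) → Bool)
    (qkeys akeys : List String)
    (hg : ∀ qa, (qkeys.any (fun k => PySem.Str.isIn k (pvQL qa))) = g qa)
    (hh : ∀ qa, (akeys.any (fun k => PySem.Str.isIn k (pvAL qa))) = h qa) :
    pvFlag qas qkeys akeys
      = pvMatchD (qas.reverse.find? g) h false := by
  unfold pvFlag pvLastAnswer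
  have : (fun qa : List (String × String) =>
      if qkeys.any (fun k => PySem.Str.isIn k (pvQL qa)) then some (pvAL qa) else none)
      = (fun qa => if g qa then some (pvAL qa) else none) := by
    funext qa; rw [hg]
  rw [this, pv_findSome?_if]
  cases hf : qas.reverse.find? g with
  | none => rfl
  | some qa => simp only [Option.map_some, pvMatchD]; exact hh qa

-- A's triple fold splits into three independent overwrite-folds
theorem pv_foldl_prod3 {α : Type} (f1 f2 f3 : Bool → α → Bool) (l : List α) (a b c : Bool) :
    l.foldl (fun (st : Bool × Bool × Bool) x => (f1 st.1 x, f2 st.2.1 x, f3 st.2.2 x)) (a, b, c)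
      = (l.foldl f1 a, l.foldl f2 b, l.foldl f3 c) := by
  induction l generalizing a b c with
  | nil => rfl
  | cons x xs ih => simp [List.foldl_cons, ih]

theorem should_downgrade_architecture_py_spec : Claim_equal_should_downgrade_architecture_py := by
  intro result qas _dom _pre
  unfold Spec_should_downgrade_architecture_py
  unfold should_downgrade_architecture_py should_downgrade_architecture_py_alt
  by_cases hsa : ((PySem.Dict.mk result).get? "architecture_type") = some "single_agent"
  · simp [hsa]
  · simp only [if_neg hsa]
    rw [pv_foldl_prod3
      (fun acc qa => if PySem.Str.isIn "integration" (pvQL qa) || PySem.Str.isIn "existing systems" (pvQL qa) then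
          (PySem.Str.isIn "no" (pvAL qa) || PySem.Str.isIn "not" (pvAL qa) || PySem.Str.isIn "won't" (pvAL qa) ||
           PySem.Str.isIn "doesn't" (pvAL qa) || PySem.Str.isIn "does not" (pvAL qa)) else acc)
      (fun acc qa => if PySem.Str.isIn "data" (pvQL qa) || PySem.Str.isIn "deliverables" (pvQL qa) || PySem.Str.isIn "outcome" (pvQL qa) then
          (PySem.Str.isIn "no data" (pvAL qa) || PySem.Str.isIn "without data" (pvAL qa) ||
           PySem.Str.isIn "purely conversation" (pvAL qa) || PySem.Str.isIn "just conversation" (pvAL qa) ||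
           PySem.Str.isIn "only conversation" (pvAL qa)) else acc)
      (fun acc qa => if PySem.Str.isIn "expect" (pvQL qa) || PySem.Str.isIn "deliverable" (pvQL qa) || PySem.Str.isIn "outcome" (pvQL qa) then
          (PySem.Str.isIn "simple" (pvAL qa) || PySem.Str.isIn "basic" (pvAL qa) || PySem.Str.isIn "just" (pvAL qa) ||
           PySem.Str.isIn "only" (pvAL qa) || PySem.Str.isIn "merely" (pvAL qa)) else acc)]
    rw [pv_foldl_overwrite, pv_foldl_overwrite, pv_foldl_overwrite]
    rw [pv_flag_eq qas (fun qa => PySem.Str.isIn "integration" (pvQL qa) || PySem.Str.isIn "existing systems" (pvQL qa)) (fun qa => PySem.Str.isIn "no" (pvAL qa) || PySem.Str.isIn "not" (pvAL qa) || PySem.Str.isIn "won't" (pvAL qa) || PySem.Str.isIn "doesn't" (pvAL qa) || PySem.Str.isIn "does not" (pvAL qa)) _ _ (fun qa => by simp [Bool.or_assoc]) (fun qa => by simp [Bool.or_assoc]),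
        pv_flag_eq qas (fun qa => PySem.Str.isIn "data" (pvQL qa) || PySem.Str.isIn "deliverables" (pvQL qa) || PySem.Str.isIn "outcome" (pvQL qa)) (fun qa => PySem.Str.isIn "no data" (pvAL qa) || PySem.Str.isIn "without data" (pvAL qa) || PySem.Str.isIn "purely conversation" (pvAL qa) || PySem.Str.isIn "just conversation" (pvAL qa) || PySem.Str.isIn "only conversation" (pvAL qa)) _ _ (fun qa => by simp [Bool.or_assoc]) (fun qa => by simp [Bool.or_assoc]),
        pv_flag_eq qas (fun qa => PySem.Str.isIn "expect" (pvQL qa) || PySem.Str.isIn "deliverable" (pvQL qa) || PySem.Str.isIn "outcome" (pvQL qa)) (fun qa => PySem.Str.isIn "simple" (pvAL qa) || PySem.Str.isIn "basic" (pvAL qa) || PySem.Str.isIn "just" (pvAL qa) || PySem.Str.isIn "only" (pvAL qa) || PySem.Str.isIn "merely" (pvAL qa)) _ _ (fun qa => by simp [Bool.or_assoc]) (fun qa => by simp [Bool.or_assoc])]
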